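-- pv_equiv track=rewrite | github.com/leadawon/TIL2024 | coding_test/Programmers/138476.py | solution
-- ===== SOURCE A (Python) =====
-- from collections import defaultdict
--
-- def solution(k, tangerine):
--     answer = 0
--     dd = defaultdict(int)
--     for t in tangerine:
--         dd[t] += 1
--     arr = []
--     for key,val in dd.items():
--         arr.append((key,val))
--     arr = sorted(arr,key=lambda x: -x[1])
--     for key,val in arr:
--         if k-val<=0:
--             answer+=1
--             break
--         else:
--             answer+=1
--             k-=val
--
--
--
--     return answer
-- ===== SOURCE B (Python) =====
-- def solution(k, tangerine):
--     if k <= 0: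
--         return 0
--     cnt = {}
--     for t in tangerine:
--         cnt[t] = cnt.get(t, 0) + 1
--     buckets = {}
--     for f in cnt.values():
--         buckets[f] = buckets.get(f, 0) + 1
--     maxf = max(cnt.values(), default=0)
--     ans = 0
--     for f in range(maxf, 0, -1):
--         c = buckets.get(f, 0)
--         if c == 0:
--             continue
--         if k <= f * c:
--             return ans - (-k // f)
--         ans += c
--         k -= f * c
--     return ans
-- ===== Notes on version B (the rewrite author's own statement) =====
-- stated objective: faster
-- what changed: Replaces the comparison sort of (size,count) pairs and linear scan by a counting-sort: counts are bucketed by frequency in a second counter and the buckets are walked from the maximum frequency downward, taking whole buckets at once and finishing a bucket with one ceiling division instead of visiting each distinct size.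
-- intended difference: For k <= 0 with a non-empty tangerine list (outside the problem's constraint 1 <= k) A always returns 1 because its loop body runs once before testing, while B returns 0, the intended number of sizes needed to pick zero tangerines. — e.g. on solution(0, [1]): A returns 1, B returns 0
import Mathlib
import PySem

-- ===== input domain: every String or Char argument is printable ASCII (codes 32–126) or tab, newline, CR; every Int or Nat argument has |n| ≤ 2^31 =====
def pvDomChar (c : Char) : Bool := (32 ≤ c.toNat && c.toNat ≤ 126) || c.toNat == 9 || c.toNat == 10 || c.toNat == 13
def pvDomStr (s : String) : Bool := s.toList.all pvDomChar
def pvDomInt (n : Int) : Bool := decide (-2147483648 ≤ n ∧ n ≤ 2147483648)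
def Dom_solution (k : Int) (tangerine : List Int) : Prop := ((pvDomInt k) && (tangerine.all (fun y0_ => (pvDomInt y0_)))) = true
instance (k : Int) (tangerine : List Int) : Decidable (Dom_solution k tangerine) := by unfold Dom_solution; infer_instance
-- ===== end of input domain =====

-- B replaces A's comparison sort of (size,count) pairs + per-size scan by bucketing the
-- counts by frequency and walking the frequencies downward (counting sort), finishing a
-- bucket with one ceiling division.

-- ===== PORT A =====
-- the final 'for key,val in arr' loop with its break, state (answer, k)
def aLoop (answer : Int) (k : Int) (arr : List (Int × Int)) : Int :=
  match arr with
  | [] => answer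
  | (_, val) :: rest =>
    if k - val ≤ 0 then answer + 1
    else aLoop (answer + 1) (k - val) rest

def solution (k : Int) (tangerine : List Int) : Int :=
  -- dd = defaultdict(int); for t in tangerine: dd[t] += 1
  let dd := tangerine.foldl (fun d t => d.modify t 0 (· + 1)) PySem.Dict.empty
  -- arr = []; for key,val in dd.items(): arr.append((key,val))
  let arr := dd.items.foldl (fun acc p => acc ++ [(p.1, p.2)]) ([] : List (Int × Int))
  -- arr = sorted(arr, key=lambda x: -x[1])
  let arr2 := PySem.List.sorted arr (fun x => -x.2) false
  aLoop 0 k arr2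

-- ===== PORT B =====
-- the 'for f in range(maxf, 0, -1)' loop with its continue / early return, state (ans, k)
def bLoop (k : Int) (ans : Int) (buckets : PySem.Dict Int Int) (fs : List Int) : Int :=
  match fs with
  | [] => ans
  | f :: rest =>
    let c := buckets.getD f 0
    if c = 0 then bLoop k ans buckets rest
    else if k ≤ f * c then ans - PySem.Int.floordiv (-k) f
    else bLoop (k - f * c) (ans + c) buckets rest

def solution_alt (k : Int) (tangerine : List Int) : Int :=
  if k ≤ 0 then 0
  else
    let cnt := tangerine.foldl (fun d t => d.insert t (d.getD t 0 + 1)) PySem.Dict.empty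
    let buckets := cnt.values.foldl (fun d f => d.insert f (d.getD f 0 + 1)) PySem.Dict.empty
    let maxf := PySem.List.maxD cnt.values (fun x => x) 0
    bLoop k 0 buckets (PySem.List.pyRange maxf 0 (-1))

-- ===== PRECONDITION & SPEC =====
-- For k ≤ 0 with a non-empty tangerine list (outside the problem's constraint 1 ≤ k) A always
-- returns 1 because its loop body runs once before testing, while B returns 0, the intended
-- number of sizes needed to pick zero tangerines.
def D_solution (k : Int) (tangerine : List Int) : Prop := k ≤ 0 ∧ tangerine ≠ []
instance (k : Int) (tangerine : List Int) : Decidable (D_solution k tangerine) := by unfold D_solution; infer_instance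

def Spec_solution (k : Int) (tangerine : List Int) (out : Int) : Prop := ¬ D_solution k tangerine → out = solution_alt k tangerine
instance (k : Int) (tangerine : List Int) (out : Int) : Decidable (Spec_solution k tangerine out) := by unfold Spec_solution; infer_instance

def pvDiffWitness_solution : Int × List Int := (0, [1])
def pvDiffWitnessOut_solution : Int × Int := (1, 0)

-- ===== CLAIM (what is proved, stated in full; the proofs are below) =====
def Claim_unchanged_solution : Prop := ∀ (k : Int) (tangerine : List Int), Dom_solution k tangerine → Spec_solution k tangerine (solution k tangerine)
def Claim_changed_solution : Prop := Dom_solution (pvDiffWitness_solution.1) (pvDiffWitness_solution.2) ∧ D_solution (pvDiffWitness_solution.1) (pvDiffWitness_solution.2) ∧ solution (pvDiffWitness_solution.1) (pvDiffWitness_solution.2) = pvDiffWitnessOut_solution.1 ∧ solution_alt (pvDiffWitness_solution.1) (pvDiffWitness_solution.2) = pvDiffWitnessOut_solution.2 ∧ pvDiffWitnessOut_solution.1 ≠ pvDiffWitnessOut_solution.2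
def Claim_exact_solution : Prop := ∀ (k : Int) (tangerine : List Int), Dom_solution k tangerine → D_solution k tangerine → solution k tangerine ≠ solution_alt k tangerine

-- ===== LEMMAS AND PROOFS =====

-- the value-only skeleton both loops reduce to: walk the counts, stop when covered
def sA (k : Int) (vs : List Int) : Int :=
  match vs with
  | [] => 0
  | v :: rest => if k - v ≤ 0 then 1 else 1 + sA (k - v) rest

theorem aLoop_eq_sA (arr : List (Int × Int)) (a k : Int) :
    aLoop a k arr = a + sA k (arr.map Prod.snd) := by
  induction arr generalizing a k with
  | nil => simp [aLoop, sA]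
  | cons p rest ih =>
    obtain ⟨key, val⟩ := p
    simp only [aLoop, sA, List.map_cons]
    split_ifs with h
    · ring
    · rw [ih]; ring

-- one bucket: c copies of frequency f are consumed either by one ceiling division or wholesale
theorem sA_replicate_append (c : Nat) (f k : Int) (rest : List Int)
    (hf : 1 ≤ f) (hk : 1 ≤ k) :
    sA k (List.replicate c f ++ rest) =
      if k ≤ f * c then -PySem.Int.floordiv (-k) f else c + sA (k - f * c) rest := by
  induction c generalizing k with
  | zero =>
    simp only [List.replicate, List.nil_append, Nat.cast_zero, mul_zero]
    rw [if_neg (by omega)]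
    ring_nf
  | succ c ih =>
    rw [List.replicate_succ, List.cons_append]
    simp only [sA]
    by_cases h1 : k - f ≤ 0
    · rw [if_pos h1, if_pos (by push_cast; nlinarith [Int.natCast_nonneg c])]
      have h2 : -PySem.Int.floordiv (-k) f = 1 := by
        rw [PySem.Int.neg_floordiv_neg_eq_iff_of_pos (by omega)]
        constructor <;> nlinarith
      omega
    · rw [if_neg h1, ih (k - f) (by omega)]
      by_cases h2 : k - f ≤ f * c
      · rw [if_pos h2, if_pos (by push_cast; nlinarith)]
        have hq := (PySem.Int.neg_floordiv_neg_eq_iff_of_pos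
          (a := k - f) (b := f) (q := -PySem.Int.floordiv (-(k - f)) f) (by omega)).mp rfl
        have h3 : -PySem.Int.floordiv (-k) f = 1 + -PySem.Int.floordiv (-(k - f)) f := by
          rw [PySem.Int.neg_floordiv_neg_eq_iff_of_pos (by omega)]
          constructor <;> nlinarith [hq.1, hq.2]
        omega
      · rw [if_neg h2, if_neg (by push_cast; nlinarith)]
        push_cast; ring_nf

-- B's loop is sA over the buckets flattened in descending frequency order
theorem bLoop_eq_sA (fs : List Int) (k a : Int) (buckets : PySem.Dict Int Int)
    (hk : 1 ≤ k) (hpos : ∀ f ∈ fs, 1 ≤ f) (hnn : ∀ f, 0 ≤ buckets.getD f 0) :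
    bLoop k a buckets fs =
      a + sA k (fs.flatMap (fun f => List.replicate (buckets.getD f 0).toNat f)) := by
  induction fs generalizing k a with
  | nil => simp [bLoop, sA]
  | cons f rest ih =>
    have hf : 1 ≤ f := hpos f (by simp)
    have hc : 0 ≤ buckets.getD f 0 := hnn f
    simp only [bLoop, List.flatMap_cons]
    by_cases h0 : buckets.getD f 0 = 0
    · rw [if_pos h0, h0]
      simp only [Int.toNat_zero, List.replicate_zero, List.nil_append]
      exact ih k a hk (fun g hg => hpos g (by simp [hg]))
    · rw [if_neg h0]
      have hcast : ((buckets.getD f 0).toNat : Int) = buckets.getD f 0 := Int.toNat_of_nonneg hc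
      rw [sA_replicate_append _ _ _ _ hf hk, hcast]
      by_cases h2 : k ≤ f * buckets.getD f 0
      · rw [if_pos h2, if_pos h2]; ring
      · rw [if_neg h2, if_neg h2,
          ih (k - f * buckets.getD f 0) (a + buckets.getD f 0) (by nlinarith)
            (fun g hg => hpos g (by simp [hg]))]
        ring

theorem count_flatMap_replicate (fs : List Int) (m : Int → Nat) (a : Int) (hnd : fs.Nodup) :
    (fs.flatMap (fun f => List.replicate (m f) f)).count a = if a ∈ fs then m a else 0 := by
  induction fs with
  | nil => simp
  | cons f rest ih =>
    simp only [List.flatMap_cons, List.count_append, List.count_replicate, List.nodup_cons] at *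
    by_cases hfa : a = f
    · subst hfa
      rw [ih hnd.2, if_neg hnd.1]
      simp
    · rw [if_neg (by simp [Ne.symm hfa]), ih hnd.2]
      simp [hfa]

theorem pairwise_flatMap_replicate (fs : List Int) (m : Int → Nat)
    (h : fs.Pairwise (fun a b => b < a)) :
    (fs.flatMap (fun f => List.replicate (m f) f)).Pairwise (fun a b => b ≤ a) := by
  induction fs with
  | nil => simp
  | cons f rest ih =>
    rw [List.pairwise_cons] at h
    simp only [List.flatMap_cons, List.pairwise_append]
    refine ⟨by rw [List.pairwise_replicate]; right; exact le_refl f, ih h.2, ?_⟩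
    intro x hx y hy
    have hxf : x = f := List.eq_of_mem_replicate hx
    obtain ⟨g, hg, hyg⟩ := List.mem_flatMap.mp hy
    have hyg' : y = g := List.eq_of_mem_replicate hyg
    have : y < x := by rw [hxf, hyg']; exact h.1 g hg
    exact le_of_lt this

theorem nodup_pyRange_countdown (n : Int) : (PySem.List.pyRange n 0 (-1)).Nodup := by
  rw [PySem.List.pyRange_neg_one_eq_reverse]
  exact List.nodup_reverse.mpr (PySem.List.nodup_pyRange_one _ _)

theorem pairwise_gt_pyRange_countdown (n : Int) :
    (PySem.List.pyRange n 0 (-1)).Pairwise (fun a b => b < a) := by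
  rw [PySem.List.pyRange_neg_one_eq_reverse, List.pairwise_reverse]
  exact PySem.List.pairwise_lt_pyRange_one _ _

theorem perm_flatMap_replicate_countdown (n : Int) (vals : List Int)
    (hv : ∀ v ∈ vals, 1 ≤ v ∧ v ≤ n) :
    ((PySem.List.pyRange n 0 (-1)).flatMap
        (fun f => List.replicate (vals.count f) f)).Perm vals := by
  rw [List.perm_iff_count]
  intro a
  rw [count_flatMap_replicate _ _ _ (nodup_pyRange_countdown n)]
  by_cases ha : a ∈ PySem.List.pyRange n 0 (-1)
  · rw [if_pos ha]
  · rw [if_neg ha]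
    rw [PySem.List.mem_pyRange_neg_one] at ha
    symm
    rw [List.count_eq_zero]
    intro hmem
    have := hv a hmem
    exact ha ⟨by omega, by omega⟩

-- the values of A's sort, read off in order, ARE the descending flattened buckets
theorem sorted_snd_eq_flatMap (arr : List (Int × Int)) (n : Int)
    (hv : ∀ v ∈ arr.map Prod.snd, 1 ≤ v ∧ v ≤ n) :
    (PySem.List.sorted arr (fun x => -x.2) false).map Prod.snd =
      (PySem.List.pyRange n 0 (-1)).flatMap
        (fun f => List.replicate ((arr.map Prod.snd).count f) f) := by
  apply List.Perm.eq_of_pairwise (le := fun a b => (b : Int) ≤ a)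
  · exact fun a b _ _ h1 h2 => le_antisymm h2 h1
  · have hp := PySem.List.sorted_pairwise arr (fun x => -x.2)
    rw [List.pairwise_map]
    exact hp.imp (by intro a b h; omega)
  · exact pairwise_flatMap_replicate _ _ (pairwise_gt_pyRange_countdown n)
  · exact (((PySem.List.sorted_perm arr _ false).map Prod.snd).trans
      (List.Perm.refl _)).trans
      ((perm_flatMap_replicate_countdown n (arr.map Prod.snd) hv).symm)

-- facts about the values of the counter of tangerine
theorem counter_values_pos (tangerine : List Int) :
    ∀ v ∈ (PySem.Dict.counter tangerine).values, 1 ≤ v := by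
  intro v hv
  have hval : (PySem.Dict.counter tangerine).values =
      (PySem.Set.ofList tangerine).map (fun key => ((tangerine.count key : Int))) := by
    have h := PySem.Dict.items_counter tangerine
    show (PySem.Dict.counter tangerine).items.map Prod.snd = _
    rw [h, List.map_map]
    rfl
  rw [hval, List.mem_map] at hv
  obtain ⟨key, hkey, rfl⟩ := hv
  have : key ∈ tangerine := (PySem.Set.mem_ofList _ _).mp hkey
  have := List.count_pos_iff.mpr this
  omega

-- ===== main equivalence =====
theorem solution_eq_alt (k : Int) (tangerine : List Int)
    (h : ¬ D_solution k tangerine) : solution k tangerine = solution_alt k tangerine := by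
  by_cases hk : k ≤ 0
  · -- then tangerine = []
    have ht : tangerine = [] := by
      by_contra hne
      exact h ⟨hk, hne⟩
    subst ht
    simp only [solution, solution_alt, if_pos hk]
    rfl
  · -- 1 ≤ k
    unfold solution solution_alt
    simp only []
    rw [if_neg hk]
    rw [PySem.Dict.foldl_insert_getD_add_one_eq_counter]
    rw [show (fun d t => PySem.Dict.modify d t 0 (· + 1)) =
          (fun (d : PySem.Dict Int Int) x => d.modify x 0 fun x => x + 1) from rfl,
        ← PySem.Dict.counter_eq_foldl]
    set dd := PySem.Dict.counter tangerine with hdd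
    set vals := dd.values with hvals
    have harr : dd.items.foldl (fun acc p => acc ++ [(p.1, p.2)]) ([] : List (Int × Int)) = dd.items := by
      have : (fun (acc : List (Int × Int)) p => acc ++ [(p.1, p.2)]) =
          (fun acc p => acc ++ [p]) := by
        funext acc p; rfl
      rw [this, PySem.List.foldl_append_singleton_eq_self, List.nil_append]
    rw [harr]
    rw [PySem.Dict.foldl_insert_getD_add_one_eq_counter]
    set maxf := PySem.List.maxD vals (fun x => x) 0 with hmaxf
    have hv : ∀ v ∈ vals, 1 ≤ v ∧ v ≤ maxf := by
      intro v hvmem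
      exact ⟨counter_values_pos tangerine v hvmem, PySem.List.le_maxD_id vals 0 v hvmem⟩
    have hA : aLoop 0 k (PySem.List.sorted dd.items (fun x => -x.2) false) =
        sA k ((PySem.List.pyRange maxf 0 (-1)).flatMap
          (fun f => List.replicate (vals.count f) f)) := by
      rw [aLoop_eq_sA, zero_add]
      congr 1
      have : dd.items.map Prod.snd = vals := rfl
      rw [sorted_snd_eq_flatMap dd.items maxf (by rw [this]; exact hv), this]
    rw [hA]
    have hB : bLoop k 0 (PySem.Dict.counter vals) (PySem.List.pyRange maxf 0 (-1)) =
        sA k ((PySem.List.pyRange maxf 0 (-1)).flatMap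
          (fun f => List.replicate (vals.count f) f)) := by
      rw [bLoop_eq_sA _ _ _ _ (by omega)
        (fun f hf => by rw [PySem.List.mem_pyRange_neg_one] at hf; omega)
        (fun f => by rw [PySem.Dict.getD_counter]; positivity)]
      rw [zero_add]
      have heq : (fun f => List.replicate ((PySem.Dict.counter vals).getD f 0).toNat f) =
          (fun f => List.replicate (vals.count f) f) := by
        funext f
        rw [PySem.Dict.getD_counter]
        simp
      rw [heq]
    rw [hB]

-- inside D_: A returns 1, B returns 0
theorem solution_one_of_D (k : Int) (tangerine : List Int)
    (hk : k ≤ 0) (hne : tangerine ≠ []) : solution k tangerine = 1 := by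
  unfold solution
  simp only []
  rw [show (fun d t => PySem.Dict.modify d t 0 (· + 1)) =
        (fun (d : PySem.Dict Int Int) x => d.modify x 0 fun x => x + 1) from rfl,
      ← PySem.Dict.counter_eq_foldl]
  set dd := PySem.Dict.counter tangerine with hdd
  have harr : dd.items.foldl (fun acc p => acc ++ [(p.1, p.2)]) ([] : List (Int × Int)) = dd.items := by
    have : (fun (acc : List (Int × Int)) p => acc ++ [(p.1, p.2)]) =
        (fun acc p => acc ++ [p]) := by
      funext acc p; rfl
    rw [this, PySem.List.foldl_append_singleton_eq_self, List.nil_append]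
  rw [harr]
  have hitems : dd.items ≠ [] := by
    rw [hdd, PySem.Dict.items_counter]
    intro hnil
    rw [List.map_eq_nil_iff] at hnil
    cases tangerine with
    | nil => exact hne rfl
    | cons t rest =>
      have : t ∈ PySem.Set.ofList (t :: rest) := (PySem.Set.mem_ofList _ _).mpr (by simp)
      rw [hnil] at this
      simp at this
  have hsne : PySem.List.sorted dd.items (fun x => -x.2) false ≠ [] := by
    rw [ne_eq, PySem.List.sorted_eq_nil_iff]
    exact hitems
  obtain ⟨p, rest, hcons⟩ := List.exists_cons_of_ne_nil hsne
  rw [hcons]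
  obtain ⟨key, val⟩ := p
  have hval : 1 ≤ val := by
    have hmem : (key, val) ∈ PySem.List.sorted dd.items (fun x => -x.2) false := by
      rw [hcons]; simp
    rw [PySem.List.mem_sorted] at hmem
    have : val ∈ dd.items.map Prod.snd := List.mem_map.mpr ⟨(key, val), hmem, rfl⟩
    exact counter_values_pos tangerine val this
  show aLoop 0 k ((key, val) :: rest) = 1
  unfold aLoop
  rw [if_pos (by omega)]
  omega

-- ===== VERDICT (by name: the statement is the Claim_ definition above) =====
theorem solution_spec : Claim_unchanged_solution := by
  intro k tangerine _ hnd
  exact solution_eq_alt k tangerine hnd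

theorem solution_changed : Claim_changed_solution := by
  unfold Claim_changed_solution; decide

theorem solution_tight : Claim_exact_solution := by
  intro k tangerine _ hd
  rw [solution_one_of_D k tangerine hd.1 hd.2]
  unfold solution_alt
  rw [if_pos hd.1]
  decide
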